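-- pv_equiv track=rewrite | github.com/melcikoo/word-journey | tools/crossword_engine.py | _find_placement_options
-- ===== SOURCE A (Python) =====
-- def _can_place(grid: list[list[str | None]], word: str, row: int, col: int,
--                direction: str, grid_size: int) -> bool:
--     """Check if a word can be placed at given position without conflicts."""
--     chars = list(word)
--     for i, ch in enumerate(chars):
--         r = row + (i if direction == "down" else 0)
--         c = col + (i if direction == "across" else 0)
--         if r < 0 or r >= grid_size or c < 0 or c >= grid_size:
--             return False
--         cell = grid[r][c]
--         if cell is not None and cell != ch:
--             return False
--     return True
--
-- def _has_intersection(grid: list[list[str | None]], word: str, row: int, col: int,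
--                       direction: str) -> bool:
--     """Check if placing this word creates at least one intersection with existing words."""
--     for i, ch in enumerate(word):
--         r = row + (i if direction == "down" else 0)
--         c = col + (i if direction == "across" else 0)
--         if grid[r][c] == ch:
--             return True
--     return False
--
-- def _check_adjacency(grid: list[list[str | None]], word: str, row: int, col: int,
--                      direction: str, grid_size: int) -> bool:
--     """Check that the word doesn't create unwanted parallel adjacency.
--
--     Allows intentional intersections (same character at crossing) but prevents
--     words from running in parallel in adjacent rows/columns, which would create
--     unintended "bonus words" in the grid.
--     """
--     chars = list(word)
--     for i, ch in enumerate(chars):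
--         r = row + (i if direction == "down" else 0)
--         c = col + (i if direction == "across" else 0)
--
--         # Skip intersection cells (these are intentional)
--         if grid[r][c] is not None:
--             continue
--
--         # Check perpendicular neighbors for non-intersection cells
--         if direction == "across":
--             for dr in [-1, 1]:
--                 nr = r + dr
--                 if 0 <= nr < grid_size and grid[nr][c] is not None:
--                     return False
--         else:
--             for dc in [-1, 1]:
--                 nc = c + dc
--                 if 0 <= nc < grid_size and grid[r][nc] is not None:
--                     return False
--
--     return True
--
-- def _find_placement_options(grid: list[list[str | None]], word: str,
--                             grid_size: int, must_intersect: bool) -> list[tuple[int, int, str]]: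
--     """Find all valid positions for a word on the grid.
--
--     Returns list of (row, col, direction) options.
--     """
--     options = []
--     for direction in ["across", "down"]:
--         for r in range(grid_size):
--             for c in range(grid_size):
--                 if not _can_place(grid, word, r, c, direction, grid_size):
--                     continue
--                 if must_intersect and not _has_intersection(grid, word, r, c, direction):
--                     continue
--                 if not _check_adjacency(grid, word, r, c, direction, grid_size):
--                     continue
--                 options.append((r, c, direction))
--     return options
-- ===== SOURCE B (Python) =====
-- def _find_placement_options(grid, word, grid_size, must_intersect):
--     """Find all valid positions for a word on the grid (single fused pass per candidate)."""
--     options = []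
--     for direction in ["across", "down"]:
--         down = direction == "down"
--         for row in range(grid_size):
--             for col in range(grid_size):
--                 ok = True
--                 intersects = False
--                 bad = False
--                 for i, ch in enumerate(word):
--                     r = row + i if down else row
--                     c = col if down else col + i
--                     if r < 0 or r >= grid_size or c < 0 or c >= grid_size:
--                         ok = False
--                         break
--                     cell = grid[r][c]
--                     if cell is None:
--                         if down:
--                             if (c - 1 >= 0 and grid[r][c - 1] is not None) or \
--                                (c + 1 < grid_size and grid[r][c + 1] is not None):
--                                 bad = True
--                         else:
--                             if (r - 1 >= 0 and grid[r - 1][c] is not None) or \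
--                                (r + 1 < grid_size and grid[r + 1][c] is not None):
--                                 bad = True
--                     elif cell == ch:
--                         intersects = True
--                     else:
--                         ok = False
--                         break
--                 if ok and not bad and (intersects or not must_intersect):
--                     options.append((row, col, direction))
--     return options
-- ===== Notes on version B (the rewrite author's own statement) =====
-- stated objective: simpler
-- what changed: The three separate per-character helper passes (_can_place, _has_intersection, _check_adjacency) are fused into one inlined loop over the word that computes placeability, an intersection flag and a bad-adjacency flag in a single pass, with early exit on out-of-bounds or conflict.
import Mathlib
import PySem

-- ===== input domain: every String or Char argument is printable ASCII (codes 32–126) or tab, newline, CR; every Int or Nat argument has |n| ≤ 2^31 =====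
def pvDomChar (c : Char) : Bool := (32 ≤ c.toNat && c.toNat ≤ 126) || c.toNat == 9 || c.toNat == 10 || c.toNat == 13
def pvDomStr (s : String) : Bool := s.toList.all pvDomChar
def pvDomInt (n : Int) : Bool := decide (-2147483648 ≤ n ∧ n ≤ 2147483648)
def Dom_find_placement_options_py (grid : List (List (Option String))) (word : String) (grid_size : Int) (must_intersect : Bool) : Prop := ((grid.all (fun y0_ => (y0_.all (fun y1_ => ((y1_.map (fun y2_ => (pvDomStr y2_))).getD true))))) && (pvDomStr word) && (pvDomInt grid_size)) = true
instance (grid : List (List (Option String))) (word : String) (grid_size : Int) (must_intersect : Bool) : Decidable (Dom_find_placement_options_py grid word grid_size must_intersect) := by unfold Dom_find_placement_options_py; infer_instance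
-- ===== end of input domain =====

-- B fuses A's three per-character helper passes (_can_place, _has_intersection, _check_adjacency)
-- into one inlined loop per candidate cell computing all three flags in a single pass (objective: simpler).
-- ===== PORT A =====
-- shared cell accessor: grid[r][c] (total form of the Python indexing; in range under Pre_)
def pvCell (grid : List (List (Option String))) (r c : Int) : Option String :=
  (PySem.List.pyGet? ((PySem.List.pyGet? grid r).getD []) c).getD none

-- _can_place: loop over enumerate(list(word))
def aCanPlace (grid : List (List (Option String))) (dir : String) (gs row col : Int) :
    List String → Int → Bool
  | [], _ => true
  | ch :: rest, i =>
      let r := row + (if dir == "down" then i else 0)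
      let c := col + (if dir == "across" then i else 0)
      if r < 0 ∨ r ≥ gs ∨ c < 0 ∨ c ≥ gs then false
      else
        let cell := pvCell grid r c
        if cell ≠ none ∧ cell ≠ some ch then false
        else aCanPlace grid dir gs row col rest (i + 1)

-- _has_intersection
def aInter (grid : List (List (Option String))) (dir : String) (row col : Int) :
    List String → Int → Bool
  | [], _ => false
  | ch :: rest, i =>
      let r := row + (if dir == "down" then i else 0)
      let c := col + (if dir == "across" then i else 0)
      if pvCell grid r c = some ch then true
      else aInter grid dir row col rest (i + 1)

-- _check_adjacency (the inner 'for dr/dc in [-1, 1]' two-element loop is unrolled)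
def aAdj (grid : List (List (Option String))) (dir : String) (gs row col : Int) :
    List String → Int → Bool
  | [], _ => true
  | _ch :: rest, i =>
      let r := row + (if dir == "down" then i else 0)
      let c := col + (if dir == "across" then i else 0)
      if pvCell grid r c ≠ none then aAdj grid dir gs row col rest (i + 1)
      else if dir == "across" then
        if (0 ≤ r - 1 ∧ r - 1 < gs ∧ pvCell grid (r - 1) c ≠ none) ∨
           (0 ≤ r + 1 ∧ r + 1 < gs ∧ pvCell grid (r + 1) c ≠ none) then false
        else aAdj grid dir gs row col rest (i + 1)
      else
        if (0 ≤ c - 1 ∧ c - 1 < gs ∧ pvCell grid r (c - 1) ≠ none) ∨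
           (0 ≤ c + 1 ∧ c + 1 < gs ∧ pvCell grid r (c + 1) ≠ none) then false
        else aAdj grid dir gs row col rest (i + 1)

-- the body of A's innermost loop
def aCell (grid : List (List (Option String))) (chars : List String) (gs : Int) (must : Bool)
    (dir : String) (acc : List (Int × Int × String)) (r c : Int) : List (Int × Int × String) :=
  if ¬ aCanPlace grid dir gs r c chars 0 then acc
  else if must && !aInter grid dir r c chars 0 then acc
  else if ¬ aAdj grid dir gs r c chars 0 then acc
  else acc ++ [(r, c, dir)]

def find_placement_options_py (grid : List (List (Option String))) (word : String) (grid_size : Int) (must_intersect : Bool) : List (Int × Int × String) :=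
  let chars := word.toList.map Char.toString
  (["across", "down"] : List String).foldl (fun acc dir =>
    (PySem.List.pyRange 0 grid_size 1).foldl (fun acc r =>
      (PySem.List.pyRange 0 grid_size 1).foldl (fun acc c =>
        aCell grid chars grid_size must_intersect dir acc r c) acc) acc) []

-- ===== PORT B =====
-- the fused per-candidate loop of B: returns none on early break ('ok = False'),
-- otherwise some (intersects, bad)
def bScan (grid : List (List (Option String))) (down : Bool) (gs row col : Int) :
    List String → Int → Bool → Bool → Option (Bool × Bool)
  | [], _, inter, bad => some (inter, bad)
  | ch :: rest, i, inter, bad =>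
      let r := if down then row + i else row
      let c := if down then col else col + i
      if r < 0 ∨ r ≥ gs ∨ c < 0 ∨ c ≥ gs then none
      else
        match pvCell grid r c with
        | none =>
            let bad' : Bool :=
              if down then
                decide ((0 ≤ c - 1 ∧ pvCell grid r (c - 1) ≠ none) ∨
                        (c + 1 < gs ∧ pvCell grid r (c + 1) ≠ none))
              else
                decide ((0 ≤ r - 1 ∧ pvCell grid (r - 1) c ≠ none) ∨
                        (r + 1 < gs ∧ pvCell grid (r + 1) c ≠ none))
            bScan grid down gs row col rest (i + 1) inter (bad || bad')
        | some cell =>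
            if cell = ch then bScan grid down gs row col rest (i + 1) true bad
            else none

-- the body of B's innermost loop
def bCell (grid : List (List (Option String))) (chars : List String) (gs : Int) (must : Bool)
    (dir : String) (down : Bool) (acc : List (Int × Int × String)) (r c : Int) :
    List (Int × Int × String) :=
  match bScan grid down gs r c chars 0 false false with
  | none => acc
  | some (inter, bad) => if !bad && (inter || !must) then acc ++ [(r, c, dir)] else acc

def find_placement_options_py_alt (grid : List (List (Option String))) (word : String) (grid_size : Int) (must_intersect : Bool) : List (Int × Int × String) :=
  (["across", "down"] : List String).foldl (fun acc dir =>
    let down := dir == "down"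
    (PySem.List.pyRange 0 grid_size 1).foldl (fun acc row =>
      (PySem.List.pyRange 0 grid_size 1).foldl (fun acc col =>
        bCell grid (word.toList.map Char.toString) grid_size must_intersect dir down acc row col) acc) acc) []

-- ===== PRECONDITION & SPEC =====
-- Pre_ excludes exactly the inputs on which Python A raises IndexError: a positive grid_size
-- with a nonempty word while grid has fewer than grid_size rows, or some of its first
-- grid_size rows has fewer than grid_size cells (every such cell is probed by _can_place).
def Pre_find_placement_options_py (grid : List (List (Option String))) (word : String) (grid_size : Int) (must_intersect : Bool) : Prop :=
  grid_size ≤ 0 ∨ word = "" ∨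
    (grid_size ≤ (grid.length : Int) ∧
      ∀ row ∈ grid.take grid_size.toNat, grid_size ≤ (row.length : Int))
instance (grid : List (List (Option String))) (word : String) (grid_size : Int) (must_intersect : Bool) : Decidable (Pre_find_placement_options_py grid word grid_size must_intersect) := by unfold Pre_find_placement_options_py; infer_instance

def pvWitness_find_placement_options_py : List (List (Option String)) × String × Int × Bool :=
  ([[none, some "a"], [some "b", none]], "ab", 2, false)

def Spec_find_placement_options_py (grid : List (List (Option String))) (word : String) (grid_size : Int) (must_intersect : Bool) (out : List (Int × Int × String)) : Prop := out = find_placement_options_py_alt grid word grid_size must_intersect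
instance (grid : List (List (Option String))) (word : String) (grid_size : Int) (must_intersect : Bool) (out : List (Int × Int × String)) : Decidable (Spec_find_placement_options_py grid word grid_size must_intersect out) := by unfold Spec_find_placement_options_py; infer_instance

-- ===== CLAIM (what is proved, stated in full; the proofs are below) =====
def Claim_equal_find_placement_options_py : Prop := ∀ (grid : List (List (Option String))) (word : String) (grid_size : Int) (must_intersect : Bool), Dom_find_placement_options_py grid word grid_size must_intersect → Pre_find_placement_options_py grid word grid_size must_intersect → Spec_find_placement_options_py grid word grid_size must_intersect (find_placement_options_py grid word grid_size must_intersect)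

-- ===== LEMMAS AND PROOFS =====

-- the fused scan equals the triple of A's three passes
lemma bScan_eq_three (grid : List (List (Option String))) (gs row col : Int)
    (dir : String) (down : Bool)
    (h : (dir = "across" ∧ down = false) ∨ (dir = "down" ∧ down = true)) :
    ∀ (chars : List String) (i : Int) (inter bad : Bool),
      bScan grid down gs row col chars i inter bad =
        if aCanPlace grid dir gs row col chars i then
          some (inter || aInter grid dir row col chars i,
                bad || !aAdj grid dir gs row col chars i)
        else none := by
  intro chars
  induction chars with
  | nil => intro i inter bad; simp [bScan, aCanPlace, aInter, aAdj]
  | cons ch rest ih =>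
    intro i inter bad
    rcases h with ⟨hdir, hdn⟩ | ⟨hdir, hdn⟩ <;> subst hdir <;> subst hdn <;>
      simp only [bScan, aCanPlace, aInter, aAdj,
                 show (("across" : String) == "down") = false from rfl,
                 show (("down" : String) == "down") = true from rfl,
                 show (("across" : String) == "across") = true from rfl,
                 show (("down" : String) == "across") = false from rfl,
                 Bool.false_eq_true, if_true, if_false, ite_true, ite_false, add_zero]
    · -- direction "across": r = row fixed, c = col + i
      by_cases hb : row < 0 ∨ row ≥ gs ∨ col + i < 0 ∨ col + i ≥ gs
      · simp [hb]
      · rw [if_neg hb]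
        push_neg at hb
        rcases hb with ⟨hb0, hb1, hb2, hb3⟩
        cases hc : pvCell grid row (col + i) with
        | none =>
          rw [ih]
          by_cases h1 : (1 : Int) ≤ row <;>
            by_cases h2 : row + 1 < gs <;>
            by_cases hm1 : pvCell grid (row - 1) (col + i) = none <;>
            by_cases hp1 : pvCell grid (row + 1) (col + i) = none <;>
            simp [hc, h1, h2, hm1, hp1, hb0, hb1, hb2, hb3,
              show row - 1 < gs by omega, show (0 : Int) ≤ row + 1 by omega, Bool.or_assoc]
        | some cell =>
          by_cases hceq : cell = ch
          · subst hceq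
            simp [hc, hb0, hb1, hb2, hb3, ih]
          · simp [hc, hceq, hb0, hb1, hb2, hb3]
    · -- direction "down": r = row + i, c = col fixed
      by_cases hb : row + i < 0 ∨ row + i ≥ gs ∨ col < 0 ∨ col ≥ gs
      · simp [hb]
      · rw [if_neg hb]
        push_neg at hb
        rcases hb with ⟨hb0, hb1, hb2, hb3⟩
        cases hc : pvCell grid (row + i) col with
        | none =>
          rw [ih]
          by_cases h1 : (1 : Int) ≤ col <;>
            by_cases h2 : col + 1 < gs <;>
            by_cases hm1 : pvCell grid (row + i) (col - 1) = none <;>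
            by_cases hp1 : pvCell grid (row + i) (col + 1) = none <;>
            simp [hc, h1, h2, hm1, hp1, hb0, hb1, hb2, hb3,
              show col - 1 < gs by omega, show (0 : Int) ≤ col + 1 by omega, Bool.or_assoc]
        | some cell =>
          by_cases hceq : cell = ch
          · subst hceq
            simp [hc, hb0, hb1, hb2, hb3, ih]
          · simp [hc, hceq, hb0, hb1, hb2, hb3]

lemma cellfun_eq (grid : List (List (Option String))) (chars : List String) (gs : Int)
    (must : Bool) (dir : String) (down : Bool)
    (h : (dir = "across" ∧ down = false) ∨ (dir = "down" ∧ down = true)) :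
    bCell grid chars gs must dir down = aCell grid chars gs must dir := by
  funext acc r c
  simp only [bCell, aCell, bScan_eq_three grid gs r c dir down h chars 0 false false,
    Bool.false_or]
  by_cases hcp : aCanPlace grid dir gs r c chars 0 = true
  · simp only [hcp, if_pos]
    cases hI : aInter grid dir r c chars 0 <;>
      cases hA : aAdj grid dir gs r c chars 0 <;> cases must <;> simp_all
  · simp [hcp]

lemma main_eq (grid : List (List (Option String))) (word : String) (grid_size : Int)
    (must_intersect : Bool) :
    find_placement_options_py grid word grid_size must_intersect =
      find_placement_options_py_alt grid word grid_size must_intersect := by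
  simp only [find_placement_options_py, find_placement_options_py_alt, List.foldl]
  simp only [show (("across" : String) == "down") = false from rfl,
             show (("down" : String) == "down") = true from rfl]
  rw [cellfun_eq grid (word.toList.map Char.toString) grid_size must_intersect
        "across" false (Or.inl ⟨rfl, rfl⟩),
      cellfun_eq grid (word.toList.map Char.toString) grid_size must_intersect
        "down" true (Or.inr ⟨rfl, rfl⟩)]

-- ===== VERDICT (by name: the statement is the Claim_ definition above) =====
theorem find_placement_options_py_spec : Claim_equal_find_placement_options_py := by
  intro grid word grid_size must_intersect _ _
  unfold Spec_find_placement_options_py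
  exact main_eq grid word grid_size must_intersect
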